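-- pv_equiv track=rewrite | github.com/ttl2004/PTIT-CODE | Python/ICPC0114-Perfect prime.py | is_perfect_prime
-- ===== SOURCE A (Python) =====
-- import math
--
-- def is_prime(n):
--     if n < 2:
--         return False
--     for i in range(2, int(math.sqrt(n)) + 1):
--         if n % i == 0:
--             return False
--     return True
--
-- def reverse_number(n):
--     return int(str(n)[::-1])
--
-- def digit_sum(n):
--     return sum(int(d) for d in str(n))
--
-- def is_perfect_prime(n):
--     if not is_prime(n):
--         return False
--
--     reversed_n = reverse_number(n)
--     if not is_prime(reversed_n):
--         return False
--
--     total = digit_sum(n)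
--     if not is_prime(total):
--         return False
--
--     for digit in str(n):
--         if not is_prime(int(digit)):
--             return False
--
--     return True
-- ===== SOURCE B (Python) =====
-- def _is_prime(m):
--     # 6k±1 wheel trial division
--     if m < 4:
--         return m == 2 or m == 3
--     if m % 2 == 0 or m % 3 == 0:
--         return False
--     i = 5
--     while i * i <= m:
--         if m % i == 0:
--             return False
--         i += 2 if i % 6 == 5 else 4
--     return True
--
--
-- def is_perfect_prime(n):
--     if n < 2:
--         return False
--     # one arithmetic pass over the digits of n (no str(n)): extracts digits
--     # little-endian, which yields the reversed decimal string directly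
--     rev_digits = []
--     total = 0
--     m = n
--     while m > 0:
--         d = m % 10
--         if d not in (2, 3, 5, 7):
--             return False
--         total += d
--         rev_digits.append(chr(48 + d))
--         m //= 10
--     return _is_prime(n) and _is_prime(int("".join(rev_digits))) and _is_prime(total)
-- ===== Notes on version B (the rewrite author's own statement) =====
-- stated objective: alternative
-- what changed: B never calls str(n): one arithmetic loop (d = m%10, m //= 10) extracts the digits little-endian, rejecting any digit outside {2,3,5,7}, accumulating the digit sum, and building the reversed decimal string directly from the little-endian digits, replacing A's three separate string scans and its per-digit trial-division primality calls; primality itself uses a 6k±1 wheel (check 2 and 3, then probe only numbers ≡ ±1 mod 6) instead of A's range(2, int(sqrt(n))+1) scan over every candidate.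
import Mathlib
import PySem

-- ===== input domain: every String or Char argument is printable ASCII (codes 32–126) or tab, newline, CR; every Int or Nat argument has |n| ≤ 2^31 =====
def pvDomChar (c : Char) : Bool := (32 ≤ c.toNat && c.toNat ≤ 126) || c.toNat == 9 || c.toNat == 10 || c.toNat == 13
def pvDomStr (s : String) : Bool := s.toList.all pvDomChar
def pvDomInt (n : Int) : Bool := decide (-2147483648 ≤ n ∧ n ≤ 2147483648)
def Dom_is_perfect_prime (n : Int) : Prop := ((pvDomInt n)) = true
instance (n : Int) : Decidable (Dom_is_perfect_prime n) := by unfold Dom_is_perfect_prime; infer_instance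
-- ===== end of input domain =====

-- B never converts n to a string: one arithmetic loop extracts the digits little-endian (which yields the
-- reversed decimal string directly), testing digit membership in {2,3,5,7} and accumulating the digit sum,
-- and primality uses a 6k±1 wheel instead of A's range-to-sqrt scan (objective: alternative algorithm).

-- ===== PORT A =====
-- int(math.sqrt(m)) : for every magnitude reached under Dom (|n| ≤ 2^31, hence reversals < 10^10 and digit
-- sums ≤ 90) the correctly-rounded float sqrt truncates exactly to the integer square root, so it is Nat.sqrt.
def pySqrtA (m : Int) : Int := ((Int.toNat m).sqrt : Int)

def is_prime_A (m : Int) : Bool :=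
  if m < 2 then false
  else if (PySem.List.pyRange 2 (pySqrtA m + 1) 1).any (fun i => PySem.Int.mod m i == 0) then false
  else true

-- int(str(n)[::-1]); the int() ValueError is unreachable at its call site (str of an n ≥ 2 is all digits)
def reverse_number_A (m : Int) : Int :=
  (PySem.Int.ofChars? ((PySem.List.slice? (PySem.Int.toChars m) none none (-1)).getD [])).getD 0

-- sum(int(d) for d in str(n)); int() ValueError unreachable (each d is a decimal digit char)
def digit_sum_A (m : Int) : Int :=
  ((PySem.Int.toChars m).map (fun c => (PySem.Int.ofChars? [c]).getD 0)).sum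

def is_perfect_prime (n : Int) : Bool :=
  if !(is_prime_A n) then false
  else
    let reversed_n := reverse_number_A n
    if !(is_prime_A reversed_n) then false
    else
      let total := digit_sum_A n
      if !(is_prime_A total) then false
      else if (PySem.Int.toChars n).all (fun c => is_prime_A ((PySem.Int.ofChars? [c]).getD 0)) then true
      else false

-- ===== PORT B =====
-- 6k±1 wheel: while i*i <= m probe i, then step i by 2 (from i ≡ 5 mod 6) or 4 (from i ≡ 1 mod 6);
-- termination lemma cited by decreasing_by
theorem pv_wheel_measure {m i s : Int} (h : i * i ≤ m) (hs : 2 ≤ s) :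
    (m + 2 - (i + s)).toNat < (m + 2 - i).toNat := by
  have h1 : 0 ≤ (i - 1) * (i - 1) := mul_self_nonneg (i - 1)
  have : i ≤ m + 1 := by nlinarith
  omega

def wheel_go (m i : Int) : Bool :=
  if h : i * i ≤ m then
    if PySem.Int.mod m i == 0 then false
    else wheel_go m (i + (if PySem.Int.mod i 6 == 5 then 2 else 4))
  else true
termination_by (m + 2 - i).toNat
decreasing_by exact pv_wheel_measure h (by split <;> omega)

def is_prime_B (m : Int) : Bool :=
  if m < 4 then (m == 2 || m == 3)
  else if PySem.Int.mod m 2 == 0 || PySem.Int.mod m 3 == 0 then false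
  else wheel_go m 5

-- the fused arithmetic digit loop (while m > 0); none = early `return False`;
-- chr(48 + d) is ported as Char.ofNat (48 + d).toNat, exact since d is a digit 0..9 here;
-- termination lemma cited by decreasing_by
theorem pv_scan_measure {m : Int} (h : 0 < m) : (PySem.Int.floordiv m 10).toNat < m.toNat := by
  rw [PySem.Int.floordiv_eq_ediv_of_pos (by omega)]
  omega

def digit_scan (m : Int) (revds : List Char) (total : Int) : Option (List Char × Int) :=
  if h : 0 < m then
    let d := PySem.Int.mod m 10
    if ([2, 3, 5, 7] : List Int).contains d then
      digit_scan (PySem.Int.floordiv m 10) (revds ++ [Char.ofNat (48 + d).toNat]) (total + d)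
    else none
  else some (revds, total)
termination_by m.toNat
decreasing_by exact pv_scan_measure h

-- int("".join(rev_digits)); the ValueError is unreachable (the loop ran at least once, all chars digits)
def is_perfect_prime_alt (n : Int) : Bool :=
  if n < 2 then false
  else
    match digit_scan n [] 0 with
    | none => false
    | some (revds, total) =>
        is_prime_B n
          && is_prime_B ((PySem.Int.ofChars? revds).getD 0)
          && is_prime_B total

-- ===== PRECONDITION & SPEC =====
def Spec_is_perfect_prime (n : Int) (out : Bool) : Prop := out = is_perfect_prime_alt n
instance (n : Int) (out : Bool) : Decidable (Spec_is_perfect_prime n out) := by unfold Spec_is_perfect_prime; infer_instance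

-- ===== CLAIM =====
def Claim_equal_is_perfect_prime : Prop := ∀ (n : Int), Dom_is_perfect_prime n → Spec_is_perfect_prime n (is_perfect_prime n)

-- ===== LEMMAS AND PROOFS =====

-- the common characterisation of both primality tests
def PrimeSpec (m : Int) : Prop := 2 ≤ m ∧ ∀ j : Int, 2 ≤ j → j * j ≤ m → ¬ j ∣ m

theorem sqrt_iff (m j : Int) (hm : 0 ≤ m) (hj : 0 ≤ j) : (j ≤ pySqrtA m ↔ j * j ≤ m) := by
  obtain ⟨a, rfl⟩ : ∃ a : Nat, j = (a : Int) := ⟨j.toNat, (Int.toNat_of_nonneg hj).symm⟩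
  obtain ⟨b, rfl⟩ : ∃ b : Nat, m = (b : Int) := ⟨m.toNat, (Int.toNat_of_nonneg hm).symm⟩
  simp only [pySqrtA, Int.toNat_natCast]
  rw [Nat.cast_le, Nat.le_sqrt]
  constructor <;> intro h <;> exact_mod_cast h

theorem is_prime_A_iff (m : Int) : is_prime_A m = true ↔ PrimeSpec m := by
  unfold is_prime_A PrimeSpec
  by_cases hm : m < 2
  · simp only [if_pos hm]
    constructor
    · intro h; exact absurd h Bool.false_ne_true
    · rintro ⟨h2, -⟩; omega
  · rw [if_neg hm]
    constructor
    · intro h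
      refine ⟨by omega, fun j hj hjm hdvd => ?_⟩
      split at h
      · exact absurd h Bool.false_ne_true
      · next hany =>
        exact hany (List.any_eq_true.mpr ⟨j, by
          rw [PySem.List.mem_pyRange_one]
          refine ⟨⟨hj, ?_⟩, by simp [(PySem.Int.mod_eq_zero_iff_dvd m j).mpr hdvd]⟩
          have := (sqrt_iff m j (by omega) (by omega)).mpr hjm
          omega⟩)
    · rintro ⟨-, h⟩
      rw [if_neg]
      rw [List.any_eq_true]
      rintro ⟨j, hjmem, hjd⟩
      rw [PySem.List.mem_pyRange_one] at hjmem
      have hjs : j * j ≤ m := (sqrt_iff m j (by omega) (by omega)).mp (by omega)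
      exact h j hjmem.1 hjs ((PySem.Int.mod_eq_zero_iff_dvd m j).mp (by simpa using hjd))

theorem wheel_true (m : Int) : ∀ i : Int, 2 ≤ i →
    (∀ j : Int, 2 ≤ j → j * j ≤ m → ¬ j ∣ m) → wheel_go m i = true := by
  intro i
  induction i using wheel_go.induct (m := m) with
  | case1 i hii hmod =>
    intro h2 h
    exact absurd ((PySem.Int.mod_eq_zero_iff_dvd m i).mp (by simpa using hmod)) (h i h2 hii)
  | case2 i hii hmod ih =>
    intro h2 h
    rw [wheel_go, dif_pos hii, if_neg hmod]
    exact ih (by split <;> omega) h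
  | case3 i hii =>
    intro _ _
    rw [wheel_go, dif_neg hii]

theorem wheel_false (m : Int) (p : Int) (hp5 : 5 ≤ p) (hpr : p % 6 = 5 ∨ p % 6 = 1)
    (hpd : p ∣ m) (hpsq : p * p ≤ m) :
    ∀ i : Int, 5 ≤ i → (i % 6 = 5 ∨ i % 6 = 1) → i ≤ p → wheel_go m i = false := by
  intro i
  induction i using wheel_go.induct (m := m) with
  | case1 i hii hmod =>
    intro _ _ _
    rw [wheel_go, dif_pos hii, if_pos hmod]
  | case2 i hii hmod ih =>
    intro h5 hir hip
    rw [wheel_go, dif_pos hii, if_neg hmod]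
    have hne : i ≠ p := by
      rintro rfl
      exact hmod (by simp [(PySem.Int.mod_eq_zero_iff_dvd m i).mpr hpd])
    have hmod6 : PySem.Int.mod i 6 = i % 6 := PySem.Int.mod_eq_emod_of_pos (by omega)
    rcases hir with h6 | h6
    · have hb : (PySem.Int.mod i 6 == 5) = true := by rw [hmod6, h6]; rfl
      rw [hb, if_pos rfl]
      rw [hb] at ih
      rw [dif_pos rfl] at ih
      rcases hpr with hr | hr <;> exact ih (by omega) (by omega) (by omega)
    · have hb : (PySem.Int.mod i 6 == 5) = false := by rw [hmod6, h6]; rfl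
      rw [hb, if_neg Bool.false_ne_true]
      rw [hb] at ih
      rw [dif_neg Bool.false_ne_true] at ih
      rcases hpr with hr | hr <;> exact ih (by omega) (by omega) (by omega)
  | case3 i hii =>
    intro h5 _ hip
    exfalso
    have : i * i ≤ p * p := mul_le_mul (by omega) (by omega) (by omega) (by omega)
    exact hii (le_trans this hpsq)

theorem beq_int_eq (a b : Int) : (a == b) = decide (a = b) := rfl

theorem is_prime_B_iff (m : Int) : is_prime_B m = true ↔ PrimeSpec m := by
  unfold is_prime_B PrimeSpec
  by_cases h4 : m < 4
  · rw [if_pos h4]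
    by_cases h2 : m = 2
    · subst h2
      exact ⟨fun _ => ⟨by omega, fun j hj hjm => absurd hjm (by nlinarith)⟩, fun _ => rfl⟩
    · by_cases h3 : m = 3
      · subst h3
        exact ⟨fun _ => ⟨by omega, fun j hj hjm => absurd hjm (by nlinarith)⟩, fun _ => rfl⟩
      · have hb : (m == 2 || m == 3) = false := by
          simp [beq_int_eq, h2, h3]
        rw [hb]
        constructor
        · intro h; exact absurd h Bool.false_ne_true
        · rintro ⟨hm2, -⟩
          exfalso
          omega
  · rw [if_neg h4]
    by_cases hdvd : (2 : Int) ∣ m ∨ (3 : Int) ∣ m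
    · have hb : (PySem.Int.mod m 2 == 0 || PySem.Int.mod m 3 == 0) = true := by
        rcases hdvd with h | h
        · simp [PySem.Int.mod_eq_zero_iff_dvd, h]
        · simp [PySem.Int.mod_eq_zero_iff_dvd, h]
      rw [hb, if_pos rfl]
      constructor
      · intro h; exact absurd h Bool.false_ne_true
      · rintro ⟨-, h⟩
        exfalso
        by_cases hd2 : (2 : Int) ∣ m
        · exact h 2 (by omega) (by norm_num; omega) hd2
        · have hd3 : (3 : Int) ∣ m := by tauto
          have h9 : 9 ≤ m := by omega
          exact h 3 (by omega) (by norm_num; omega) hd3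
    · push_neg at hdvd
      obtain ⟨hnd2, hnd3⟩ := hdvd
      have hb : (PySem.Int.mod m 2 == 0 || PySem.Int.mod m 3 == 0) = false := by
        simp only [Bool.or_eq_false_iff, beq_int_eq, decide_eq_false_iff_not]
        exact ⟨fun h => hnd2 ((PySem.Int.mod_eq_zero_iff_dvd m 2).mp h),
               fun h => hnd3 ((PySem.Int.mod_eq_zero_iff_dvd m 3).mp h)⟩
      rw [hb, if_neg Bool.false_ne_true]
      constructor
      · intro h
        refine ⟨by omega, fun j hj hjm hjd => ?_⟩
        -- from a divisor j in [2, √m] extract the least prime factor p of m.toNat and run the wheel to it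
        set M := m.toNat with hM
        have hmM : (M : Int) = m := Int.toNat_of_nonneg (by omega)
        have hjM : j.toNat ∣ M := by
          have h1 : j.natAbs ∣ m.natAbs := Int.natAbs_dvd_natAbs.mpr hjd
          have e1 : j.natAbs = j.toNat := by omega
          have e2 : m.natAbs = M := by omega
          rwa [e1, e2] at h1
        have hj2 : 2 ≤ j.toNat := by omega
        have hjsq : j.toNat * j.toNat ≤ M := by
          have : ((j.toNat * j.toNat : Nat) : Int) ≤ (M : Int) := by
            push_cast
            rw [Int.toNat_of_nonneg (by omega : (0:Int) ≤ j), hmM]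
            exact hjm
          exact_mod_cast this
        have hMnp : ¬ M.Prime := by
          intro hP
          rcases (Nat.Prime.eq_one_or_self_of_dvd hP _ hjM) with h1 | hself
          · omega
          · have : j.toNat < j.toNat * j.toNat := by nlinarith
            omega
        have hM4 : 4 ≤ M := by omega
        set p := M.minFac with hpdef
        have hpP : p.Prime := Nat.minFac_prime (by omega)
        have hpd : p ∣ M := Nat.minFac_dvd M
        have hpsq : p * p ≤ M := by
          have := Nat.minFac_sq_le_self (by omega : 0 < M) hMnp
          rwa [Nat.pow_two] at this
        have hp2 : p ≠ 2 := by
          intro hpe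
          rw [hpe] at hpd
          exact hnd2 (by rw [← hmM]; exact_mod_cast Int.natCast_dvd_natCast.mpr hpd)
        have hp3 : p ≠ 3 := by
          intro hpe
          rw [hpe] at hpd
          exact hnd3 (by rw [← hmM]; exact_mod_cast Int.natCast_dvd_natCast.mpr hpd)
        have hpodd : p % 2 = 1 := by
          by_contra h0
          have h2p : (2 : Nat) ∣ p := Nat.dvd_of_mod_eq_zero (by omega)
          rcases Nat.Prime.eq_one_or_self_of_dvd hpP 2 h2p with h | h <;> omega
        have hpn3 : p % 3 ≠ 0 := by
          intro h0
          have h3p : (3 : Nat) ∣ p := Nat.dvd_of_mod_eq_zero h0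
          rcases Nat.Prime.eq_one_or_self_of_dvd hpP 3 h3p with h | h <;> omega
        have hp5 : 5 ≤ p := by
          have := hpP.two_le
          omega
        have hfalse : wheel_go m 5 = false := by
          refine wheel_false m (p : Int) (by exact_mod_cast hp5) ?_ ?_ ?_ 5 (by omega) (by omega) (by exact_mod_cast hp5)
          · have hc : ((p : Int)) % 6 = ((p % 6 : Nat) : Int) := by
              omega
            omega
          · rw [← hmM]; exact_mod_cast Int.natCast_dvd_natCast.mpr hpd
          · rw [← hmM]; exact_mod_cast Nat.cast_le.mpr hpsq
        rw [h] at hfalse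
        exact absurd hfalse (by simp)
      · rintro ⟨-, h⟩
        exact wheel_true m 5 (by omega) h

theorem prime_eq (m : Int) : is_prime_A m = is_prime_B m := by
  rw [Bool.eq_iff_iff, is_prime_A_iff, is_prime_B_iff]

-- decimal-digit machinery relating both ports to Nat.digits 10
theorem toDigitsCore_eq (N : Nat) : ∀ (fuel : Nat) (acc : List Char), 0 < N → N ≤ fuel →
    Nat.toDigitsCore 10 fuel N acc = (Nat.digits 10 N).reverse.map Nat.digitChar ++ acc := by
  induction N using Nat.strong_induction_on with
  | _ N ih =>
    intro fuel acc h0 hf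
    match fuel with
    | 0 => omega
    | f + 1 =>
      rw [Nat.toDigitsCore]
      rw [Nat.digits_def' (by norm_num : 1 < 10) h0]
      by_cases hq : N / 10 = 0
      · rw [if_pos hq, hq]
        simp
      · rw [if_neg hq]
        rw [ih (N / 10) (Nat.div_lt_self h0 (by norm_num)) f _ (Nat.pos_of_ne_zero hq)
          (by
            have := Nat.div_lt_self h0 (by norm_num : 1 < 10)
            omega)]
        simp

theorem toChars_eq (n : Int) (h : 2 ≤ n) :
    PySem.Int.toChars n = (Nat.digits 10 n.toNat).reverse.map Nat.digitChar := by
  have hneg : ¬ n < 0 := by omega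
  simp only [PySem.Int.toChars, if_neg hneg, Nat.toDigits]
  rw [toDigitsCore_eq n.toNat (n.toNat + 1) [] (by omega) (by omega)]
  simp

theorem val_digit_A (d : Nat) (hd : d < 10) :
    (PySem.Int.ofChars? [Nat.digitChar d]).getD 0 = (d : Int) := by
  interval_cases d <;> decide

theorem prime_digit_A (d : Nat) (hd : d < 10) :
    is_prime_A ((PySem.Int.ofChars? [Nat.digitChar d]).getD 0)
      = ([2, 3, 5, 7] : List Nat).contains d := by
  rw [val_digit_A d hd, prime_eq]
  interval_cases d <;>
    simp [is_prime_B, wheel_go, PySem.Int.mod, Int.emod_emod_of_dvd]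

theorem digit_scan_eq (N : Nat) : ∀ (revds : List Char) (total : Int), 0 < N →
    digit_scan (N : Int) revds total =
      if (Nat.digits 10 N).all (fun d => ([2, 3, 5, 7] : List Nat).contains d) then
        some (revds ++ (Nat.digits 10 N).map Nat.digitChar,
              total + ((Nat.digits 10 N).sum : Int))
      else none := by
  induction N using Nat.strong_induction_on with
  | _ N ih =>
    intro revds total h0
    have hpos : (0 : Int) < (N : Int) := by exact_mod_cast h0
    rw [digit_scan, dif_pos hpos]
    have hmod : PySem.Int.mod (N : Int) 10 = ((N % 10 : Nat) : Int) := by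
      exact_mod_cast PySem.Int.mod_natCast N 10
    have hdiv : PySem.Int.floordiv (N : Int) 10 = ((N / 10 : Nat) : Int) := by
      exact_mod_cast PySem.Int.floordiv_natCast N 10
    rw [Nat.digits_def' (by norm_num : 1 < 10) h0]
    simp only [hmod, List.all_cons, List.map_cons, List.sum_cons]
    have hcontains : (([2, 3, 5, 7] : List Int).contains ((N % 10 : Nat) : Int))
        = (([2, 3, 5, 7] : List Nat).contains (N % 10)) := by
      have : N % 10 < 10 := Nat.mod_lt _ (by norm_num)
      interval_cases h : N % 10 <;> decide
    have hchar : Char.ofNat (48 + ((N % 10 : Nat) : Int)).toNat = Nat.digitChar (N % 10) := by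
      have : N % 10 < 10 := Nat.mod_lt _ (by norm_num)
      interval_cases h : N % 10 <;> decide
    rw [hcontains]
    by_cases hc : (([2, 3, 5, 7] : List Nat).contains (N % 10)) = true
    · rw [if_pos hc, hc, Bool.true_and, hdiv, hchar]
      by_cases hq : N / 10 = 0
      · rw [hq]
        rw [digit_scan]
        rw [dif_neg (by norm_num)]
        rw [Nat.digits_zero]
        simp only [List.all_nil, List.map_nil, List.sum_nil, if_pos rfl]
        refine congrArg some (Prod.ext ?_ ?_)
        · simp
        · show total + ((N % 10 : Nat) : Int) = total + ((N % 10 + 0 : Nat) : Int)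
          push_cast
          ring
      · rw [ih (N / 10) (Nat.div_lt_self h0 (by norm_num)) _ _ (Nat.pos_of_ne_zero hq)]
        split
        · refine congrArg some (Prod.ext ?_ ?_)
          · simp
          · show _ = total + ((N % 10 + (Nat.digits 10 (N / 10)).sum : Nat) : Int)
            push_cast
            ring
        · rfl
    · rw [if_neg hc, Bool.eq_false_iff.mpr hc, Bool.false_and, if_neg Bool.false_ne_true]

theorem all_digits_eq (L : List Nat) (hlt : ∀ d ∈ L, d < 10) :
    ((L.map Nat.digitChar).all (fun c => is_prime_A ((PySem.Int.ofChars? [c]).getD 0)))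
      = (L.all (fun d => ([2, 3, 5, 7] : List Nat).contains d)) := by
  induction L with
  | nil => rfl
  | cons d rest ih =>
    simp only [List.map_cons, List.all_cons]
    rw [prime_digit_A d (hlt d List.mem_cons_self), ih (fun x hx => hlt x (List.mem_cons_of_mem d hx))]

theorem sum_digits_eq (L : List Nat) (hlt : ∀ d ∈ L, d < 10) :
    ((L.map Nat.digitChar).map (fun c => (PySem.Int.ofChars? [c]).getD 0)).sum
      = ((L.sum : Nat) : Int) := by
  induction L with
  | nil => rfl
  | cons d rest ih =>
    simp only [List.map_cons, List.sum_cons]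
    rw [val_digit_A d (hlt d List.mem_cons_self), ih (fun x hx => hlt x (List.mem_cons_of_mem d hx))]
    push_cast
    ring

theorem bool_shape (b1 b2 b3 b4 : Bool) :
    (if !b1 then false else if !b2 then false else if !b3 then false else if b4 then true else false)
      = (b1 && b2 && b3 && b4) := by
  cases b1 <;> cases b2 <;> cases b3 <;> cases b4 <;> rfl

-- ===== VERDICT =====
theorem is_perfect_prime_spec : Claim_equal_is_perfect_prime := by
  unfold Claim_equal_is_perfect_prime Spec_is_perfect_prime
  intro n _
  by_cases hn : n < 2
  · have hA : is_prime_A n = false := by simp [is_prime_A, hn]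
    simp [is_perfect_prime, is_perfect_prime_alt, hA, hn]
  · have h2 : 2 ≤ n := by omega
    set N := n.toNat with hNdef
    have hmN : (N : Int) = n := Int.toNat_of_nonneg (by omega)
    set L := Nat.digits 10 N with hLdef
    have hlt : ∀ d ∈ L, d < 10 := fun d hd => Nat.digits_lt_base (by norm_num) hd
    have hch : PySem.Int.toChars n = (L.reverse).map Nat.digitChar := toChars_eq n h2
    -- A's pieces in terms of the little-endian digit list L
    have hrevA : reverse_number_A n
        = (PySem.Int.ofChars? (L.map Nat.digitChar)).getD 0 := by
      rw [reverse_number_A, hch, PySem.List.slice?_none_none_neg_one]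
      simp [List.map_reverse]
    have hsumA : digit_sum_A n = ((L.sum : Nat) : Int) := by
      rw [digit_sum_A, hch]
      simp only [List.map_reverse, List.sum_reverse]
      exact sum_digits_eq L hlt
    have hallA : ((PySem.Int.toChars n).all (fun c => is_prime_A ((PySem.Int.ofChars? [c]).getD 0)))
        = (L.all (fun d => ([2, 3, 5, 7] : List Nat).contains d)) := by
      rw [hch]
      simp only [List.map_reverse, List.all_reverse]
      exact all_digits_eq L hlt
    -- B's scan in terms of L
    have hscan : digit_scan n [] 0
        = if L.all (fun d => ([2, 3, 5, 7] : List Nat).contains d) then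
            some (L.map Nat.digitChar, 0 + ((L.sum : Nat) : Int))
          else none := by
      rw [← hmN, digit_scan_eq N [] 0 (by omega)]
      simp [← hLdef]
    rw [is_perfect_prime, is_perfect_prime_alt, if_neg hn, bool_shape, hscan]
    by_cases hall : (L.all (fun d => ([2, 3, 5, 7] : List Nat).contains d)) = true
    · rw [if_pos hall]
      rw [hallA, hall, hrevA, hsumA]
      simp only [prime_eq, zero_add, Bool.and_true]
    · rw [if_neg hall, hallA, Bool.eq_false_iff.mpr hall]
      simp
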